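/- GENERATED by tools/from_farm_form.py from prooffarm-gif/accepted/DGifDecompressLine.6/Lemmas.lean (a worked proof of the farm's unit `DGifDecompressLine.6`,
   accepted by the verdict) — do not edit. -/
import Gif.Spec.Units.DGifDecompressLine_6
import Gif.Spec.AllSegs

/-!
  Lemmas for the unit `DGifDecompressLine.6` (segment 6 of the LZW decoder, dgif_lib.c:905-908: the clear arm resets
  `RunningCode = EOFCode + 1`, `RunningBits = BitsPerPixel + 1`, `MaxCode1 = 1 << RunningBits`, `LastCode = NO_SUCH_CODE`).

  Everything general is in the tree (Gif/Spec/Words.lean, Gif/Spec/LzwCarry.lean: `Body.carry_lz`). What is left are the two facts of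
  THIS segment:

      dl6_succ_val        the number stored by `mov eax, [m32] ; lea r12d, [rax+1] ; mov [m32], r12d` is the number loaded plus 1
      dl6_lzok            `LZOK` again after the four stores: [LZ3] from `RunningCode = EOFCode + 1 = ClearCode + 2`, [LZ4] from
                          `RunningBits = BitsPerPixel + 1`, the other clauses from the footprint
-/

open X86 X86.User Asan ProgX.Base ProgX.Base.Spec Gif.Spec

namespace Gif.Spec.DGifDecompressLine_6

/-- **`mov eax, [m32] ; lea r12d, [rax+1]`**: the 32-bit value the walker leaves in `r12d` (and stores), for a loaded dword `k` whose
successor does not wrap: the number `k + 1` (`RunningCode = EOFCode + 1`, l.905; `RunningBits = BitsPerPixel + 1`, l.906). -/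
theorem dl6_succ_val (k : Nat) (hk : k + 1 < 2 ^ 32) :
    (BitVec.setWidth 32 (Word.ofBV (BitVec.ofNat 32 k) + 1).toBitVec).toNat = k + 1 := by
  have e0 : (Word.ofBV (BitVec.ofNat 32 k)).toNat = k := Gif.Spec.toNat_ofBV_ofNat32 k (by omega)
  have e1 := Gif.Spec.lea32_succ (Word.ofBV (BitVec.ofNat 32 k)) (by omega)
  rw [ProgX.toNat_ofBV32, e0] at e1
  exact e1

/-- **`LZOK` AFTER THE CLEAR ARM** (l.905-908): the memory changed only in windows that miss `[pv + 8, pv + 20)` (BitsPerPixel,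
ClearCode, EOFCode) and `[pv + 40, pv + 48)` (StackPtr, CrntShiftState) — the stack, and `[pv + 20, pv + 40)` —, `RunningCode` is
now `EOFCode + 1` (= `ClearCode + 2`: [LZ3]) and `RunningBits` is `BitsPerPixel + 1` ([LZ4]: at most 9). -/
theorem dl6_lzok {mem mem' : Mem} {pv : Nat} {ws : List Span} (h : LZOK mem pv) (hp : pv + 48 < 2 ^ 64)
    (hs : Mem.SameExcept ws mem mem')
    (hd : ∀ w, w ∈ ws → w.hi ≤ pv + 8 ∨ pv + 48 ≤ w.lo ∨ (pv + 20 ≤ w.lo ∧ w.hi ≤ pv + 40))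
    (h_rc : GifFilePrivateType.RunningCode mem' pv = GifFilePrivateType.EOFCode mem pv + 1)
    (h_rb : GifFilePrivateType.RunningBits mem' pv = GifFilePrivateType.BitsPerPixel mem pv + 1) : LZOK mem' pv := by
  -- the five fields that were not stored to
  have e_bpp : GifFilePrivateType.BitsPerPixel mem' pv = GifFilePrivateType.BitsPerPixel mem pv := by
    simp only [gfield]
    apply hs.rd (pv + 8) 4 (by omega)
    intro w hw
    have := hd w hw
    omega
  have e_clear : GifFilePrivateType.ClearCode mem' pv = GifFilePrivateType.ClearCode mem pv := by
    simp only [gfield]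
    apply hs.rd (pv + 12) 4 (by omega)
    intro w hw
    have := hd w hw
    omega
  have e_eof : GifFilePrivateType.EOFCode mem' pv = GifFilePrivateType.EOFCode mem pv := by
    simp only [gfield]
    apply hs.rd (pv + 16) 4 (by omega)
    intro w hw
    have := hd w hw
    omega
  have e_sp : GifFilePrivateType.StackPtr mem' pv = GifFilePrivateType.StackPtr mem pv := by
    simp only [gfield]
    apply hs.rd (pv + 40) 4 (by omega)
    intro w hw
    have := hd w hw
    omega
  have e_shift : GifFilePrivateType.CrntShiftState mem' pv = GifFilePrivateType.CrntShiftState mem pv := by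
    simp only [gfield]
    apply hs.rd (pv + 44) 4 (by omega)
    intro w hw
    have := hd w hw
    omega
  obtain ⟨k_bpp, k_clear, k_eof, _, _, _, _, k_sp, k_shift⟩ := h
  refine ⟨?_, ?_, ?_, ?_, ?_, ?_, ?_, ?_, ?_⟩
  · -- [LZ1]
    rw [e_bpp]
    exact k_bpp
  · -- [LZ2]
    rw [e_clear]
    exact k_clear
  · rw [e_eof, e_clear]
    exact k_eof
  · -- [LZ3] `RunningCode = EOFCode + 1 = ClearCode + 2`
    rw [h_rc, e_clear]
    omega
  · rw [h_rc]
    omega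
  · -- [LZ4] `RunningBits = BitsPerPixel + 1 ≤ 9`
    rw [h_rb, e_bpp]
    omega
  · rw [h_rb]
    omega
  · -- [LZ5]
    rw [e_sp]
    exact k_sp
  · -- [LZ6]
    rw [e_shift]
    exact k_shift

end Gif.Spec.DGifDecompressLine_6
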